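-- pv_equiv track=rewrite | github.com/markhovs/dpp-pilot-project | backend/app/services/dpp/sections.py | _normalize_field_name
-- ===== SOURCE A (Python) =====
-- def _normalize_field_name(name):
--     """Convert field names to camelCase."""
--     if not name:
--         return ""
--
--     # Handle special cases for numeric indexes in names
--     if "__" in name:
--         name = name.replace("__", "_")
--
--     parts = name.split("_")
--     result = parts[0].lower()
--     for part in parts[1:]:
--         if part:
--             result += part[0].upper() + part[1:].lower()
--
--     return result
-- ===== SOURCE B (Python) =====
-- def _normalize_field_name(name):
--     """Convert field names to camelCase (single state-machine pass)."""
--     out = []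
--     in_first = True
--     word_start = True
--     for c in name:
--         if c == '_':
--             in_first = False
--             word_start = True
--         elif in_first or not word_start:
--             out.append(c.lower())
--         else:
--             out.append(c.upper())
--             word_start = False
--     return ''.join(out)
-- ===== Notes on version B (the rewrite author's own statement) =====
-- stated objective: simpler
-- what changed: Replaced A's double-underscore-collapsing preprocessing plus split-on-underscore/capitalize-parts passes by a single character-level state machine with two flags (in_first, word_start); the collapsing step is dropped because the machine skips empty segments by itself.
import Mathlib
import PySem

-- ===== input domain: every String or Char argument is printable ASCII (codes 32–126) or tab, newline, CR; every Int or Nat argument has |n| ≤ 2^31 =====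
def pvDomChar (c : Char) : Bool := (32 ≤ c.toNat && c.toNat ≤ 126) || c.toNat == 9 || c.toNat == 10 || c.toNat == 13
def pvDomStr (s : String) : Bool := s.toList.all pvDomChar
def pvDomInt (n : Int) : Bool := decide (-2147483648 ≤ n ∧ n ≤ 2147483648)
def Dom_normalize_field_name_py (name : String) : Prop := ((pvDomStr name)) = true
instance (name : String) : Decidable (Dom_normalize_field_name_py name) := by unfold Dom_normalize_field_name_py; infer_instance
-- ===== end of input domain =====

-- B replaces A's split-on-underscore pass (plus a redundant double-underscore collapse) by a
-- single character-by-character state machine with two flags; objective: simpler, same O(n) cost.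

-- ===== PORT A =====
-- Literal transliteration of A at the List Char level (PySem.Chars primitives;
-- part[0] is ported as headI, exact because the loop guard ensures part ≠ []).
def normalize_field_name_py (name : String) : String :=
  if name.toList = [] then ""
  else
    let name1 : List Char :=
      if PySem.Chars.isIn ['_', '_'] name.toList then
        PySem.Chars.replace name.toList ['_', '_'] ['_']
      else name.toList
    let parts := PySem.Chars.splitOn name1 ['_']
    let result := PySem.Chars.lower parts.headI
    let result := parts.tail.foldl
      (fun result part =>
        if part ≠ [] then
          result ++ (PySem.Chars.upperChar part.headI :: PySem.Chars.lower (part.drop 1))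
        else result)
      result
    String.ofList result

-- ===== PORT B =====
-- Transliteration of Source B: one fold over the characters with state (out, in_first, word_start).
def normalize_field_name_py_alt (name : String) : String :=
  let st := name.toList.foldl
    (fun (st : List Char × Bool × Bool) c =>
      let out := st.1
      let in_first := st.2.1
      let word_start := st.2.2
      if c = '_' then (out, false, true)
      else if in_first || !word_start then (out ++ [PySem.Chars.lowerChar c], in_first, word_start)
      else (out ++ [PySem.Chars.upperChar c], in_first, false))
    ([], true, true)
  String.ofList st.1

-- ===== PRECONDITION & SPEC =====
def Spec_normalize_field_name_py (name : String) (out : String) : Prop := out = normalize_field_name_py_alt name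
instance (name : String) (out : String) : Decidable (Spec_normalize_field_name_py name out) := by unfold Spec_normalize_field_name_py; infer_instance

-- ===== CLAIM (what is proved, stated in full; the proofs are below) =====
def Claim_equal_normalize_field_name_py : Prop := ∀ (name : String), Dom_normalize_field_name_py name → Spec_normalize_field_name_py name (normalize_field_name_py name)

-- ===== LEMMAS AND PROOFS =====

/-- Structural version of splitting on `'_'` (always returns a nonempty list). -/
def mySplit : List Char → List (List Char)
  | [] => [[]]
  | c :: t => if c = '_' then [] :: mySplit t
      else match mySplit t with
        | [] => [[c]]
        | s :: rest => (c :: s) :: rest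

/-- Structural version of A's double-underscore collapse (left-to-right). -/
def myRep : List Char → List Char
  | [] => []
  | [c] => [c]
  | c :: d :: t =>
      if c = '_' ∧ d = '_' then '_' :: myRep t else c :: myRep (d :: t)

/-- The state machine of B as a plain recursion on the remaining characters. -/
def smOut : Bool → Bool → List Char → List Char
  | _, _, [] => []
  | f, w, c :: t =>
      if c = '_' then smOut false true t
      else if f || !w then PySem.Chars.lowerChar c :: smOut f w t
      else PySem.Chars.upperChar c :: smOut f false t

/-- CamelCase contribution of the non-first parts: each nonempty part capitalized. -/
def capAll (parts : List (List Char)) : List Char :=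
  parts.foldr
    (fun p r => if p = [] then r else PySem.Chars.upperChar p.headI :: PySem.Chars.lower (p.drop 1) ++ r)
    []

theorem smOut_us (f w : Bool) (t : List Char) : smOut f w ('_' :: t) = smOut false true t := by
  simp [smOut]

theorem smOut_ch (f w : Bool) {c : Char} (t : List Char) (hc : c ≠ '_') :
    smOut f w (c :: t) =
      if f || !w then PySem.Chars.lowerChar c :: smOut f w t
      else PySem.Chars.upperChar c :: smOut f false t := by
  rw [smOut, if_neg hc]

theorem myRep_uu (t : List Char) : myRep ('_' :: '_' :: t) = '_' :: myRep t := by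
  rw [myRep, if_pos ⟨rfl, rfl⟩]

theorem myRep_ne (t : List Char) {c d : Char} (h : ¬(c = '_' ∧ d = '_')) :
    myRep (c :: d :: t) = c :: myRep (d :: t) := by
  rw [myRep, if_neg h]

theorem mySplit_us (t : List Char) : mySplit ('_' :: t) = [] :: mySplit t := by
  rw [mySplit, if_pos rfl]

theorem capAll_nil_cons (ps : List (List Char)) : capAll ([] :: ps) = capAll ps := by
  simp [capAll]

theorem capAll_cons {p : List Char} (ps : List (List Char)) (hp : p ≠ []) :
    capAll (p :: ps) = PySem.Chars.upperChar p.headI :: PySem.Chars.lower (p.drop 1) ++ capAll ps := by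
  simp [capAll, hp]

theorem mySplit_ne_nil (l : List Char) : mySplit l ≠ [] := by
  cases l with
  | nil => simp [mySplit]
  | cons c t =>
      simp only [mySplit]
      split
      · simp
      · split <;> simp

theorem mySplit_headI_tail (l : List Char) : (mySplit l).headI :: (mySplit l).tail = mySplit l := by
  cases h : mySplit l with
  | nil => exact absurd h (mySplit_ne_nil l)
  | cons s rest => simp

theorem mySplit_cons_ne {c : Char} (t : List Char) (hc : c ≠ '_') :
    mySplit (c :: t) = (c :: (mySplit t).headI) :: (mySplit t).tail := by
  simp only [mySplit, if_neg hc]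
  cases h : mySplit t with
  | nil => exact absurd h (mySplit_ne_nil t)
  | cons s rest => simp

theorem splitOn_go_eq (fuel : Nat) : ∀ (l cur : List Char) (acc : List (List Char)),
    l.length ≤ fuel →
    PySem.Chars.splitOn.go ['_'] fuel l cur acc =
      acc.reverse ++ ((cur.reverse ++ (mySplit l).headI) :: (mySplit l).tail) := by
  induction fuel with
  | zero =>
      intro l cur acc h
      cases l with
      | nil => simp [PySem.Chars.splitOn.go, mySplit]
      | cons c t => simp at h
  | succ n ih =>
      intro l cur acc h
      cases l with
      | nil => simp [PySem.Chars.splitOn.go, mySplit]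
      | cons c t =>
          by_cases hc : c = '_'
          · subst hc
            rw [PySem.Chars.splitOn.go,
              if_pos (by simp [List.isPrefixOf] : (['_'].isPrefixOf ('_' :: t)) = true),
              show List.drop (['_'].length) ('_' :: t) = t from rfl,
              ih t [] ((cur.reverse) :: acc) (by simpa using h)]
            simp [mySplit, mySplit_headI_tail]
          · have hp : (['_'].isPrefixOf (c :: t)) = false := by
              simp [List.isPrefixOf]
              exact fun h' => hc h'.symm
            rw [PySem.Chars.splitOn.go, if_neg (by simp [hp]),
              ih t (c :: cur) acc (by simpa using h), mySplit_cons_ne t hc]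
            simp

theorem splitOn_eq (l : List Char) : PySem.Chars.splitOn l ['_'] = mySplit l := by
  show PySem.Chars.splitOn.go ['_'] (l.length + 1) l [] [] = _
  rw [splitOn_go_eq (l.length + 1) l [] [] (by omega)]
  simpa using mySplit_headI_tail l

theorem replace_go_eq (fuel : Nat) : ∀ (l acc : List Char),
    l.length ≤ fuel →
    PySem.Chars.replace.go ['_', '_'] ['_'] fuel l acc = acc.reverse ++ myRep l := by
  induction fuel with
  | zero =>
      intro l acc h
      cases l with
      | nil => simp [PySem.Chars.replace.go, myRep]
      | cons c t => simp at h
  | succ n ih =>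
      intro l acc h
      match l with
      | [] => simp [PySem.Chars.replace.go, myRep]
      | c :: t =>
          rw [PySem.Chars.replace.go]
          match t with
          | [] =>
              have hp : (['_', '_'].isPrefixOf [c]) = false := by
                simp [List.isPrefixOf]
              rw [if_neg (by simp [hp]), ih [] (c :: acc) (by simp)]
              simp [myRep]
          | d :: u =>
              by_cases hcd : c = '_' ∧ d = '_'
              · obtain ⟨h1, h2⟩ := hcd
                subst h1; subst h2
                rw [if_pos (by simp [List.isPrefixOf] : (['_', '_'].isPrefixOf ('_' :: '_' :: u)) = true),
                  show List.drop (['_', '_'].length) ('_' :: '_' :: u) = u from rfl,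
                  ih u (['_'].reverse ++ acc) (by simp at h ⊢; omega), myRep_uu]
                simp
              · have hp : (['_', '_'].isPrefixOf (c :: d :: u)) = false := by
                  rw [show (['_', '_'].isPrefixOf (c :: d :: u)) = ('_' == c && ('_' == d && true)) from rfl]
                  rcases not_and_or.mp hcd with h1 | h1
                  · have h2 : ('_' == c) = false := beq_eq_false_iff_ne.mpr fun h => h1 h.symm
                    simp [h2]
                  · have h2 : ('_' == d) = false := beq_eq_false_iff_ne.mpr fun h => h1 h.symm
                    simp [h2]
                rw [if_neg (by simp [hp]), ih (d :: u) (c :: acc) (by simpa using h),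
                  myRep_ne u hcd]
                simp

theorem replace_eq (l : List Char) :
    PySem.Chars.replace l ['_', '_'] ['_'] = myRep l := by
  show (if _ then _ else PySem.Chars.replace.go ['_', '_'] ['_'] l.length l []) = _
  rw [if_neg (by simp)]
  cases l with
  | nil => simp [PySem.Chars.replace.go, myRep]
  | cons c t => simpa using replace_go_eq (t.length + 1) (c :: t) [] (by simp)

/-- The state machine never sees the difference made by the double-underscore collapse. -/
theorem smOut_myRep (l : List Char) : ∀ f w, smOut f w (myRep l) = smOut f w l := by
  induction l using myRep.induct with
  | case1 => intro f w; rw [myRep]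
  | case2 c => intro f w; rw [myRep]
  | case3 c d t h ih =>
      intro f w
      obtain ⟨h1, h2⟩ := h
      subst h1; subst h2
      rw [myRep_uu, smOut_us, smOut_us, smOut_us, ih]
  | case4 c d t h ih =>
      intro f w
      rw [myRep_ne t h]
      by_cases hc : c = '_'
      · subst hc
        rw [smOut_us, smOut_us, ih]
      · rw [smOut_ch f w _ hc, smOut_ch f w _ hc]
        split
        · rw [ih]
        · rw [ih]

/-- After the first word: at a word boundary the machine produces `capAll` of the split;
    inside a word it lowercases the rest of the current part. -/
theorem smOut_rest (l : List Char) :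
    smOut false true l = capAll (mySplit l) ∧
    smOut false false l = PySem.Chars.lower (mySplit l).headI ++ capAll (mySplit l).tail := by
  induction l with
  | nil => simp [smOut, mySplit, capAll, PySem.Chars.lower]
  | cons c t ih =>
      by_cases hc : c = '_'
      · subst hc
        refine ⟨?_, ?_⟩
        · rw [smOut_us, ih.1, mySplit_us, capAll_nil_cons]
        · rw [smOut_us, ih.1, mySplit_us]
          simp [PySem.Chars.lower]
      · rw [mySplit_cons_ne t hc]
        refine ⟨?_, ?_⟩
        · rw [smOut_ch false true _ hc]
          simp only [Bool.false_or, Bool.not_true, if_neg (by simp : ¬(false = true))]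
          rw [ih.2, capAll_cons _ (by simp)]
          simp [PySem.Chars.lower]
        · rw [smOut_ch false false _ hc]
          simp only [Bool.false_or, Bool.not_false]
          rw [ih.2]
          simp [PySem.Chars.lower]

/-- In the first word both flags are irrelevant: everything is lowercased. -/
theorem smOut_first (l : List Char) : ∀ w,
    smOut true w l = PySem.Chars.lower (mySplit l).headI ++ capAll (mySplit l).tail := by
  induction l with
  | nil => intro w; simp [smOut, mySplit, capAll, PySem.Chars.lower]
  | cons c t ih =>
      intro w
      by_cases hc : c = '_'
      · subst hc
        rw [smOut_us, (smOut_rest t).1, mySplit_us]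
        simp [PySem.Chars.lower]
      · rw [smOut_ch true w _ hc]
        simp only [Bool.true_or]
        rw [ih w, mySplit_cons_ne t hc]
        simp [PySem.Chars.lower]

/-- A's accumulating loop over the later parts is `capAll`. -/
theorem foldl_capAll (parts : List (List Char)) : ∀ acc : List Char,
    parts.foldl
      (fun result part =>
        if part ≠ [] then
          result ++ (PySem.Chars.upperChar part.headI :: PySem.Chars.lower (part.drop 1))
        else result)
      acc = acc ++ capAll parts := by
  induction parts with
  | nil => intro acc; simp [capAll]
  | cons p ps ih =>
      intro acc
      by_cases hp : p = []
      · subst hp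
        rw [List.foldl_cons]
        simp only [ne_eq, not_true_eq_false, if_false]
        rw [ih acc]
        simp [capAll]
      · rw [List.foldl_cons]
        simp only [ne_eq, hp, not_false_eq_true, if_true]
        rw [ih]
        simp [capAll, hp]

/-- B's fold tracks `smOut` with an output accumulator. -/
theorem foldl_smOut (l : List Char) : ∀ (out : List Char) (f w : Bool),
    (l.foldl
      (fun (st : List Char × Bool × Bool) c =>
        let out := st.1
        let in_first := st.2.1
        let word_start := st.2.2
        if c = '_' then (out, false, true)
        else if in_first || !word_start then (out ++ [PySem.Chars.lowerChar c], in_first, word_start)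
        else (out ++ [PySem.Chars.upperChar c], in_first, false))
      (out, f, w)).1 = out ++ smOut f w l := by
  induction l with
  | nil => intro out f w; simp [smOut]
  | cons c t ih =>
      intro out f w
      rw [List.foldl_cons]
      by_cases hc : c = '_'
      · subst hc
        rw [smOut_us]
        simpa using ih out false true
      · rw [smOut_ch f w _ hc]
        by_cases hb : (f || !w) = true
        · simp only [if_neg hc, if_pos hb]
          rw [ih]
          simp
        · simp only [if_neg hc, if_neg hb]
          rw [ih]
          simp

theorem core_eq (l : List Char) :
    PySem.Chars.lower (mySplit l).headI ++ capAll (mySplit l).tail = smOut true true l := by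
  rw [smOut_first l true]

-- ===== VERDICT (by name: the statement is the Claim_ definition above) =====
theorem normalize_field_name_py_spec : Claim_equal_normalize_field_name_py := by
  intro name _
  show normalize_field_name_py name = normalize_field_name_py_alt name
  unfold normalize_field_name_py normalize_field_name_py_alt
  by_cases h0 : name.toList = []
  · simp [h0]
  · rw [if_neg h0]
    simp only
    rw [foldl_smOut]
    by_cases hin : PySem.Chars.isIn ['_', '_'] name.toList = true
    · rw [if_pos hin, replace_eq, splitOn_eq, foldl_capAll, core_eq, smOut_myRep]
      simp
    · rw [if_neg hin, splitOn_eq, foldl_capAll, core_eq]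
      simp
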